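-- pv_equiv track=rewrite | github.com/bicarlsen/pyscaps | pyscaps/model.py | split_section_defects
-- ===== SOURCE A (Python) =====
-- def split_section_defects( content, defect_delimeter ):
-- 	"""
-- 	:param content: List of content strings.
-- 	:defect_delimeter: String delimiting defects.
-- 	:returns: Tuple of ( properties content, [ defects content ] ).
-- 	"""
-- 	defect_indices = [
-- 		i
-- 		for i, line in enumerate( content )
-- 		if line == defect_delimeter
-- 	]
--
-- 	properties = (
-- 		content[ :defect_indices[ 0 ] ]
-- 		if len( defect_indices ) else
-- 		content
-- 	)
--
-- 	defects = []
-- 	if len( defect_indices ):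
-- 		defect_indices.append( None )
-- 		for i_start, i_end in zip( defect_indices[ :-1 ], defect_indices[ 1: ] ):
-- 			defects.append( content[ i_start + 1: i_end ] )
--
-- 	return ( properties, defects )
-- ===== SOURCE B (Python) =====
-- def split_section_defects( content, defect_delimeter ):
-- 	"""
-- 	:param content: List of content strings.
-- 	:defect_delimeter: String delimiting defects.
-- 	:returns: Tuple of ( properties content, [ defects content ] ).
-- 	"""
-- 	# single forward pass: maintain a list of segments, starting a new
-- 	# one at each delimiter; the first segment is the properties block,
-- 	# the rest are the defect blocks.
-- 	segments = [ [] ]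
-- 	for line in content:
-- 		if line == defect_delimeter:
-- 			segments.append( [] )
-- 		else:
-- 			segments[ -1 ].append( line )
--
-- 	return ( segments[ 0 ], segments[ 1: ] )
-- ===== Notes on version B (the rewrite author's own statement) =====
-- stated objective: simpler
-- what changed: B replaces A's two-phase index collection (enumerate/filter for delimiter positions, then slicing between consecutive indices via zip) with a single forward pass that maintains a list of segments, starting a new segment at each delimiter.
import Mathlib
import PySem

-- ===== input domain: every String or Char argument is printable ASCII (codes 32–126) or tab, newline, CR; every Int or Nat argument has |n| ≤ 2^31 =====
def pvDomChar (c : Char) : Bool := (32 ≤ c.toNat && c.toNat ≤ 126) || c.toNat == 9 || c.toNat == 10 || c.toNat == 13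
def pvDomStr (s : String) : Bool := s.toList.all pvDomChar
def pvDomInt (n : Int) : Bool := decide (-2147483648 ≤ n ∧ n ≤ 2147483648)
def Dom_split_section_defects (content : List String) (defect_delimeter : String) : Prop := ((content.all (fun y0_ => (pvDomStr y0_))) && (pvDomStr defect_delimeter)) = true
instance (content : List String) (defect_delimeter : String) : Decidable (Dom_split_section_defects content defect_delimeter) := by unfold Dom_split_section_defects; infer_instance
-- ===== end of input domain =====

-- B replaces A's index-collection-and-slicing with a single forward pass over a
-- growing list of segments; same cost, simpler traversal. Return-value equivalence proved.

-- ===== PORT A =====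
def split_section_defects (content : List String) (defect_delimeter : String) : List String × List (List String) :=
  -- defect_indices = [i for i, line in enumerate(content) if line == defect_delimeter]
  let defect_indices : List Int :=
    ((PySem.List.enumerate content 0).filter (fun p => p.2 == defect_delimeter)).map (fun p => p.1)
  -- properties = content[:defect_indices[0]] if len(defect_indices) else content
  -- (in the nonempty branch defect_indices[0] is its head; headI is exact there)
  let properties :=
    if defect_indices.length ≠ 0 then
      PySem.List.slice content none (some defect_indices.headI)
    else content
  -- defect_indices.append(None); zip consecutive pairs; append content[i_start+1:i_end]
  -- (the appended None makes the index list a List (Option Int); i_start from the zip is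
  -- always `some`, read with getD 0 which is never the default in that position)
  let defects :=
    if defect_indices.length ≠ 0 then
      let di : List (Option Int) := defect_indices.map some ++ [none]
      ((PySem.List.slice di none (some (-1))).zip (PySem.List.slice di (some 1) none)).foldl
        (fun acc p => acc ++ [PySem.List.slice content (some (p.1.getD 0 + 1)) p.2]) []
    else []
  (properties, defects)

-- ===== PORT B =====
-- Source B's loop body: start a new segment at a delimiter, else extend the last segment
-- (segments[-1].append(line) = replace the last segment by itself plus the line)
def altStep (defect_delimeter : String) (segs : List (List String)) (line : String) :
    List (List String) :=
  if line == defect_delimeter then segs ++ [[]]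
  else segs.dropLast ++ [segs.getLastD [] ++ [line]]

def split_section_defects_alt (content : List String) (defect_delimeter : String) :
    List String × List (List String) :=
  let segments := content.foldl (altStep defect_delimeter) [[]]
  (segments.headI, segments.tail)

-- ===== PRECONDITION & SPEC =====
def Spec_split_section_defects (content : List String) (defect_delimeter : String) (out : List String × List (List String)) : Prop := out = split_section_defects_alt content defect_delimeter
instance (content : List String) (defect_delimeter : String) (out : List String × List (List String)) : Decidable (Spec_split_section_defects content defect_delimeter out) := by unfold Spec_split_section_defects; infer_instance

-- ===== CLAIM (what is proved, stated in full; the proofs are below) =====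
def Claim_equal_split_section_defects : Prop := ∀ (content : List String) (defect_delimeter : String), Dom_split_section_defects content defect_delimeter → Spec_split_section_defects content defect_delimeter (split_section_defects content defect_delimeter)

-- ===== LEMMAS AND PROOFS =====

-- reference recursion both ports are reduced to
def segRec (d : String) : List String → List String × List (List String)
  | [] => ([], [])
  | x :: rest =>
    let r := segRec d rest
    if x = d then ([], r.1 :: r.2) else (x :: r.1, r.2)

-- B-side: the foldl over any state 'pre ++ [cur]' produces 'pre' followed by the
-- segment list of the remaining input, its first segment prefixed by 'cur'
theorem foldl_altStep (d : String) (c : List String) :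
    ∀ (pre : List (List String)) (cur : List String),
      c.foldl (altStep d) (pre ++ [cur]) =
        pre ++ (cur ++ (segRec d c).1) :: (segRec d c).2 := by
  induction c with
  | nil => intro pre cur; simp [segRec]
  | cons x rest ih =>
      intro pre cur
      by_cases h : x = d
      · have hstep : altStep d (pre ++ [cur]) x = (pre ++ [cur]) ++ [[]] := by
          simp [altStep, h]
        rw [List.foldl_cons, hstep, ih (pre ++ [cur]) []]
        simp [segRec, h]
      · have hstep : altStep d (pre ++ [cur]) x = pre ++ [cur ++ [x]] := by
          simp [altStep, h]
        rw [List.foldl_cons, hstep, ih pre (cur ++ [x])]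
        simp [segRec, h]

theorem alt_eq_segRec (c : List String) (d : String) :
    split_section_defects_alt c d = segRec d c := by
  unfold split_section_defects_alt
  have := foldl_altStep d c [] []
  simp only [List.nil_append] at this
  rw [this]
  simp

-- A-side: the delimiter-index list, with the enumerate start generalized
def idxs (d : String) (s : Int) (c : List String) : List Int :=
  ((PySem.List.enumerate c s).filter (fun p => p.2 == d)).map (fun p => p.1)

theorem idxs_cons (d : String) (s : Int) (x : String) (c : List String) :
    idxs d s (x :: c) = if x = d then s :: idxs d (s + 1) c else idxs d (s + 1) c := by
  by_cases h : x = d <;> simp [idxs, PySem.List.enumerate_cons, h]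

theorem idxs_shift (d : String) (c : List String) (s : Int) :
    idxs d (s + 1) c = (idxs d s c).map (· + 1) := by
  induction c generalizing s with
  | nil => rfl
  | cons x rest ih =>
      rw [idxs_cons, idxs_cons]
      by_cases h : x = d <;> simp [h, ih]

theorem idxs_le (d : String) (c : List String) (s : Int) :
    ∀ i ∈ idxs d s c, s ≤ i := by
  induction c generalizing s with
  | nil => intro i h; simp [idxs] at h
  | cons x rest ih =>
      intro i hi
      rw [idxs_cons] at hi
      by_cases h : x = d
      · simp [h] at hi
        rcases hi with h0 | h1
        · omega
        · have := ih (s + 1) i h1; omega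
      · simp [h] at hi
        have := ih (s + 1) i hi; omega

-- the slices A takes between consecutive delimiter indices (plus the trailing open slice)
def dsl (c : List String) : List Int → List (List String)
  | [] => []
  | [i] => [PySem.List.slice c (some (i + 1)) none]
  | i :: j :: is => PySem.List.slice c (some (i + 1)) (some j) :: dsl c (j :: is)

theorem zip_map_eq_dsl (cont : List String) :
    ∀ is : List Int,
      ((is.map some).zip (is.tail.map some ++ [none])).map
          (fun p => PySem.List.slice cont (some (p.1.getD 0 + 1)) p.2) = dsl cont is
  | [] => rfl
  | [i] => rfl
  | i :: j :: t => by
      exact congrArg₂ List.cons rfl (zip_map_eq_dsl cont (j :: t))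

theorem A_defects_eq_dsl (cont : List String) (is : List Int) :
    ((PySem.List.slice (is.map some ++ [none]) none (some (-1))).zip
        (PySem.List.slice (is.map some ++ [none]) (some 1))).foldl
      (fun acc p => acc ++ [PySem.List.slice cont (some (p.1.getD 0 + 1)) p.2]) []
      = dsl cont is := by
  rw [PySem.List.slice_to_neg_one, PySem.List.slice_from_one,
      PySem.List.foldl_append_singleton_eq_map, List.dropLast_concat]
  cases is with
  | nil => rfl
  | cons i t =>
      have := zip_map_eq_dsl cont (i :: t)
      simpa using this

theorem dsl_shift (cont : List String) (x : String) :
    ∀ is : List Int, (∀ i ∈ is, 0 ≤ i) →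
      dsl (x :: cont) (is.map (· + 1)) = dsl cont is
  | [], _ => rfl
  | [i], h => by
      have hi : 0 ≤ i := h i (by simp)
      simp only [List.map_cons, List.map_nil, dsl]
      rw [PySem.List.slice_from _ (show (0:Int) ≤ i + 1 + 1 by omega),
          PySem.List.slice_from _ (show (0:Int) ≤ i + 1 by omega)]
      have h1 : (i + 1 + 1).toNat = (i + 1).toNat + 1 := by omega
      simp only [h1, List.drop_succ_cons]
  | i :: j :: t, h => by
      have hi : 0 ≤ i := h i (by simp)
      have hj : 0 ≤ j := h j (by simp)
      simp only [List.map_cons, dsl]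
      refine congrArg₂ List.cons ?_ ?_
      · rw [PySem.List.slice_toNat _ (show (0:Int) ≤ i + 1 + 1 by omega) (show (0:Int) ≤ j + 1 by omega),
            PySem.List.slice_toNat _ (show (0:Int) ≤ i + 1 by omega) (show (0:Int) ≤ j by omega)]
        have h1 : (i + 1 + 1).toNat = (i + 1).toNat + 1 := by omega
        rw [h1]
        simp only [List.drop_succ_cons]
        congr 1
        omega
      · have := dsl_shift cont x (j :: t) (fun k hk => h k (by simp at hk ⊢; tauto))
        simpa using this

-- A written with idxs/dsl
theorem A_char (d : String) (c : List String) :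
    split_section_defects c d =
      ((if (idxs d 0 c).length ≠ 0 then PySem.List.slice c none (some (idxs d 0 c).headI)
        else c),
       dsl c (idxs d 0 c)) := by
  have h0 : split_section_defects c d =
      ((if (idxs d 0 c).length ≠ 0 then PySem.List.slice c none (some (idxs d 0 c).headI)
        else c),
       if (idxs d 0 c).length ≠ 0 then
         ((PySem.List.slice ((idxs d 0 c).map some ++ [none]) none (some (-1))).zip
             (PySem.List.slice ((idxs d 0 c).map some ++ [none]) (some 1))).foldl
           (fun acc p => acc ++ [PySem.List.slice c (some (p.1.getD 0 + 1)) p.2]) []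
       else []) := rfl
  rw [h0, A_defects_eq_dsl]
  by_cases h : (idxs d 0 c).length ≠ 0
  · simp only [if_pos h]
  · simp only [if_neg h]
    cases hc : idxs d 0 c with
    | nil => rfl
    | cons a t => rw [hc] at h; simp at h

theorem A_eq_segRec (d : String) (c : List String) :
    split_section_defects c d = segRec d c := by
  induction c with
  | nil => rfl
  | cons x rest ih =>
      rw [A_char] at ih ⊢
      have hshift : idxs d (0 + 1) rest = (idxs d 0 rest).map (· + 1) := idxs_shift d rest 0
      have hnn : ∀ i ∈ idxs d 0 rest, 0 ≤ i := idxs_le d rest 0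
      rw [idxs_cons, hshift]
      by_cases hx : x = d
      · simp only [if_pos hx]
        have hseg : segRec d (x :: rest) = ([], (segRec d rest).1 :: (segRec d rest).2) := by
          simp [segRec, hx]
        rw [hseg, ← ih]
        cases hIs : idxs d 0 rest with
        | nil =>
            simp only [List.map_nil, List.length_cons, List.length_nil, List.headI_cons,
              dsl, ne_eq, Nat.succ_ne_zero, not_false_eq_true, if_true]
            rw [PySem.List.slice_to _ (by omega : (0:Int) ≤ 0),
                PySem.List.slice_from _ (by omega : (0:Int) ≤ 0 + 1)]
            simp
        | cons i t =>
            have hi : 0 ≤ i := by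
              have := hnn i; rw [hIs] at this; exact this (by simp)
            have hnn' : ∀ k ∈ i :: t, 0 ≤ k := by
              intro k hk; have := hnn k; rw [hIs] at this; exact this hk
            simp only [List.map_cons, List.length_cons, List.headI_cons, dsl, ne_eq,
              Nat.succ_ne_zero, not_false_eq_true, if_true]
            refine congrArg₂ Prod.mk ?_ (congrArg₂ List.cons ?_ ?_)
            · rw [PySem.List.slice_to _ (by omega : (0:Int) ≤ 0)]
              simp
            · rw [PySem.List.slice_toNat _ (by omega : (0:Int) ≤ 0 + 1) (by omega : (0:Int) ≤ i + 1),
                  PySem.List.slice_to _ hi]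
              have h1 : ((0:Int) + 1).toNat = 1 := by omega
              have h2 : (i + 1).toNat - ((0:Int) + 1).toNat = i.toNat := by omega
              rw [h2, h1]
              simp
            · have := dsl_shift rest x (i :: t) hnn'
              simpa using this
      · simp only [if_neg hx]
        have hseg : segRec d (x :: rest) = (x :: (segRec d rest).1, (segRec d rest).2) := by
          simp [segRec, hx]
        rw [hseg, ← ih]
        cases hIs : idxs d 0 rest with
        | nil =>
            simp [dsl]
        | cons i t =>
            have hi : 0 ≤ i := by
              have := hnn i; rw [hIs] at this; exact this (by simp)
            have hnn' : ∀ k ∈ i :: t, 0 ≤ k := by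
              intro k hk; have := hnn k; rw [hIs] at this; exact this hk
            simp only [List.map_cons, List.length_cons, List.headI_cons, ne_eq,
              Nat.succ_ne_zero, not_false_eq_true, if_true]
            refine congrArg₂ Prod.mk ?_ ?_
            · rw [PySem.List.slice_to _ (by omega : (0:Int) ≤ i + 1),
                  PySem.List.slice_to _ hi]
              have h1 : (i + 1).toNat = i.toNat + 1 := by omega
              rw [h1]
              simp
            · have := dsl_shift rest x (i :: t) hnn'
              simpa using this

-- ===== VERDICT (by name: the statement is the Claim_ definition above) =====
theorem split_section_defects_spec : Claim_equal_split_section_defects := by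
  intro content d _
  unfold Spec_split_section_defects
  rw [alt_eq_segRec, A_eq_segRec]
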